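-- pv_equiv track=rewrite | github.com/joshuaowalker/specimux | specimux.py | color_sequence
-- ===== SOURCE A (Python) =====
-- from typing import List, Tuple, Dict
--
-- def color_sequence(seq: str, quality_scores: List[int], p1_location: Tuple[int, int],
--                    p2_location: Tuple[int, int], b1_location: Tuple[int, int], b2_location: Tuple[int, int]):
--     blue = "\033[0;34m"
--     green = "\033[0;32m"
--     red = "\033[0;31m"
--     color_reset = "\033[0m"  # No Color (reset)
--
--     seq_len = len(seq)
--     colored_seq = [''] * seq_len  # Initialize a list to hold colored characters
--     start = 0
--     end = seq_len
--
--     def color_region(location, color):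
--         if location is not None:
--             cstart, cend = location
--             if cstart < 0 or cend < 0:
--                 return
--
--             for i in range(cstart, cend + 1):  # Include the end position
--                 if i < seq_len:
--                     if quality_scores[i] < 10:
--                         colored_seq[i] = color + seq[i].lower() + color_reset
--                     else:
--                         colored_seq[i] = color + seq[i] + color_reset
--
--     # Color barcode1 (blue)
--     color_region(b1_location, blue)
--
--     # Color primer1 (green)
--     color_region(p1_location, green)
--
--     # Color primer2 (green)
--     color_region(p2_location, green)
--
--     # Color barcode2 (blue)
--     color_region(b2_location, blue)
--
--     # Fill in uncolored regions
--     for i in range(seq_len):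
--         if colored_seq[i] == '':
--             if quality_scores[i] < 10:
--                 colored_seq[i] = seq[i].lower()
--             else:
--                 colored_seq[i] = seq[i]
--
--     return ''.join(colored_seq[start:end])
-- ===== SOURCE B (Python) =====
-- def color_sequence(seq, quality_scores, p1_location, p2_location, b1_location, b2_location):
--     blue = "\033[0;34m"
--     green = "\033[0;32m"
--     color_reset = "\033[0m"
--
--     # Priority order: the region A paints last wins, so test b2, p2, p1, b1.
--     regions = [(b2_location, blue), (p2_location, green), (p1_location, green), (b1_location, blue)]
--
--     def covers(loc, i):
--         return loc is not None and loc[0] >= 0 and loc[1] >= 0 and loc[0] <= i <= loc[1]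
--
--     out = []
--     for i, ch in enumerate(seq):
--         c = ch.lower() if quality_scores[i] < 10 else ch
--         for loc, color in regions:
--             if covers(loc, i):
--                 c = color + c + color_reset
--                 break
--         out.append(c)
--     return ''.join(out)
-- ===== Notes on version B (the rewrite author's own statement) =====
-- stated objective: simpler
-- what changed: Region-major overwrite painting into a mutable array (paint b1, p1, p2, b2 over each other, then fill the gaps) is replaced by a single position-major pass that picks each character's color by first match in priority order b2, p2, p1, b1.
import Mathlib
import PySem

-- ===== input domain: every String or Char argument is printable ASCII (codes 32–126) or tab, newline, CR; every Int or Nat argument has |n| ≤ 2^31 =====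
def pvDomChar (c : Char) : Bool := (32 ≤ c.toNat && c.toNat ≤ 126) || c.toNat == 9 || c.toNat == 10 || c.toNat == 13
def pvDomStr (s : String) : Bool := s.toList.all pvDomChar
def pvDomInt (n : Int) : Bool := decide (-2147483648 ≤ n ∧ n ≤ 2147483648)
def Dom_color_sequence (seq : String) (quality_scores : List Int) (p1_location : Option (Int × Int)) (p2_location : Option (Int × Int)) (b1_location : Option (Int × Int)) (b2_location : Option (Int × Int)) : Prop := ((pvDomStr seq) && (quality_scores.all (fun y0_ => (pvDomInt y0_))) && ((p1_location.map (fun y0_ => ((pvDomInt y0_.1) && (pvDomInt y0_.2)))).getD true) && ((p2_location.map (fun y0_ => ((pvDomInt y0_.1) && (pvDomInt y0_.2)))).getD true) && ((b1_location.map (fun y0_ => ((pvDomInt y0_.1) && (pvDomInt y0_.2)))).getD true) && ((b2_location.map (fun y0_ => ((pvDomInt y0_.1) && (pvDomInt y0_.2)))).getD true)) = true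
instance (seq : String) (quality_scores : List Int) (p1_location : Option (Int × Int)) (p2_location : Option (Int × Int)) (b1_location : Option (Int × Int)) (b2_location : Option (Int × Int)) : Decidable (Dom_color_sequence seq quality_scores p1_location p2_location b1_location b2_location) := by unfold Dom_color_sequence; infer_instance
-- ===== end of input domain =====

-- B replaces A's region-major overwrite painting (paint b1, p1, p2, b2 over a buffer, then fill gaps)
-- by a single position-major pass choosing each character's color by first match in priority order b2, p2, p1, b1.


-- ===== PORT A =====
-- ANSI color constants as char lists ("\033[0;34m", "\033[0;32m", "\033[0m")
def pvBlue : List Char := [Char.ofNat 27, '[', '0', ';', '3', '4', 'm']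
def pvGreen : List Char := [Char.ofNat 27, '[', '0', ';', '3', '2', 'm']
def pvReset : List Char := [Char.ofNat 27, '[', '0', 'm']

-- the (possibly lower-cased) character at index i, as a one-char chunk
def pvPlain (cs : List Char) (qs : List Int) (i : Int) : List Char :=
  if PySem.List.pyGetD qs i 0 < 10 then [PySem.Chars.lowerChar (PySem.List.pyGetD cs i ' ')]
  else [PySem.List.pyGetD cs i ' ']

-- A's inner helper color_region: paint every index of the region over acc
def pvColorRegion (cs : List Char) (qs : List Int) (loc : Option (Int × Int)) (color : List Char)
    (acc : List (List Char)) : List (List Char) :=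
  match loc with
  | none => acc
  | some (cstart, cend) =>
    if cstart < 0 ∨ cend < 0 then acc
    else (PySem.List.pyRange cstart (cend + 1) 1).foldl
      (fun l i => if i < (cs.length : Int) then PySem.List.pySetD l i (color ++ pvPlain cs qs i ++ pvReset) else l) acc

def color_sequence (seq : String) (quality_scores : List Int) (p1_location : Option (Int × Int)) (p2_location : Option (Int × Int)) (b1_location : Option (Int × Int)) (b2_location : Option (Int × Int)) : String :=
  let cs := seq.toList
  let n := cs.length
  let colored0 : List (List Char) := List.replicate n []
  let c1 := pvColorRegion cs quality_scores b1_location pvBlue colored0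
  let c2 := pvColorRegion cs quality_scores p1_location pvGreen c1
  let c3 := pvColorRegion cs quality_scores p2_location pvGreen c2
  let c4 := pvColorRegion cs quality_scores b2_location pvBlue c3
  let final := (PySem.List.pyRange 0 (n : Int) 1).foldl
    (fun l i => if PySem.List.pyGetD l i [] = [] then PySem.List.pySetD l i (pvPlain cs quality_scores i) else l) c4
  String.ofList (PySem.List.slice final (some 0) (some (n : Int))).flatten

-- ===== PORT B =====
-- B: is region loc valid and does it cover index i?
def pvCovers (loc : Option (Int × Int)) (i : Int) : Bool :=
  match loc with
  | none => false
  | some (a, b) => decide (0 ≤ a) && decide (0 ≤ b) && decide (a ≤ i) && decide (i ≤ b)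

-- B: one output chunk for position i holding character ch
def pvChunk (qs : List Int) (regions : List ((Option (Int × Int)) × List Char)) (i : Int) (ch : Char) : List Char :=
  let c := if PySem.List.pyGetD qs i 0 < 10 then [PySem.Chars.lowerChar ch] else [ch]
  match regions.find? (fun rc => pvCovers rc.1 i) with
  | some rc => rc.2 ++ c ++ pvReset
  | none => c

def color_sequence_alt (seq : String) (quality_scores : List Int) (p1_location : Option (Int × Int)) (p2_location : Option (Int × Int)) (b1_location : Option (Int × Int)) (b2_location : Option (Int × Int)) : String :=
  let regions := [(b2_location, pvBlue), (p2_location, pvGreen), (p1_location, pvGreen), (b1_location, pvBlue)]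
  String.ofList ((PySem.List.enumerate seq.toList 0).map (fun p => pvChunk quality_scores regions p.1 p.2)).flatten

-- ===== PRECONDITION & SPEC =====

-- A indexes quality_scores at every position of seq (raising IndexError when it is shorter)
def Pre_color_sequence (seq : String) (quality_scores : List Int) (p1_location : Option (Int × Int)) (p2_location : Option (Int × Int)) (b1_location : Option (Int × Int)) (b2_location : Option (Int × Int)) : Prop :=
  seq.toList.length ≤ quality_scores.length
instance (seq : String) (quality_scores : List Int) (p1_location : Option (Int × Int)) (p2_location : Option (Int × Int)) (b1_location : Option (Int × Int)) (b2_location : Option (Int × Int)) : Decidable (Pre_color_sequence seq quality_scores p1_location p2_location b1_location b2_location) := by unfold Pre_color_sequence; infer_instance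
def pvWitness_color_sequence : String × List Int × (Option (Int × Int)) × (Option (Int × Int)) × (Option (Int × Int)) × (Option (Int × Int)) :=
  ("ACGT", [5, 20, 3, 12], some (1, 2), none, some (0, 0), some (2, 3))
def Spec_color_sequence (seq : String) (quality_scores : List Int) (p1_location : Option (Int × Int)) (p2_location : Option (Int × Int)) (b1_location : Option (Int × Int)) (b2_location : Option (Int × Int)) (out : String) : Prop := out = color_sequence_alt seq quality_scores p1_location p2_location b1_location b2_location
instance (seq : String) (quality_scores : List Int) (p1_location : Option (Int × Int)) (p2_location : Option (Int × Int)) (b1_location : Option (Int × Int)) (b2_location : Option (Int × Int)) (out : String) : Decidable (Spec_color_sequence seq quality_scores p1_location p2_location b1_location b2_location out) := by unfold Spec_color_sequence; infer_instance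

-- ===== CLAIM (what is proved, stated in full; the proofs are below) =====
def Claim_equal_color_sequence : Prop := ∀ (seq : String) (quality_scores : List Int) (p1_location : Option (Int × Int)) (p2_location : Option (Int × Int)) (b1_location : Option (Int × Int)) (b2_location : Option (Int × Int)), Dom_color_sequence seq quality_scores p1_location p2_location b1_location b2_location → Pre_color_sequence seq quality_scores p1_location p2_location b1_location b2_location → Spec_color_sequence seq quality_scores p1_location p2_location b1_location b2_location (color_sequence seq quality_scores p1_location p2_location b1_location b2_location)

-- ===== LEMMAS AND PROOFS =====

-- length preservation for a fold whose steps keep the length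
lemma pvFoldl_length {α : Type} (f : List α → Int → List α)
    (hf : ∀ (l : List α) (i : Int), (f l i).length = l.length) (r : List Int) (l : List α) :
    (r.foldl f l).length = l.length := by
  induction r generalizing l with
  | nil => rfl
  | cons i r ih => rw [List.foldl_cons, ih, hf]

-- a fold that writes v i at index i (guarded by i < n), value independent of the accumulator
lemma pvFoldl_set_get? (v : Int → List Char) (n : Nat) (r : List Int) (hr : ∀ i ∈ r, 0 ≤ i)
    (l : List (List Char)) (hl : l.length = n) (j : Nat) :
    (r.foldl (fun l i => if i < (n : Int) then PySem.List.pySetD l i (v i) else l) l)[j]? =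
      if (j : Int) ∈ r ∧ j < n then some (v j) else l[j]? := by
  induction r generalizing l with
  | nil => simp
  | cons i r ih =>
    have hi : 0 ≤ i := hr i (by simp)
    have hstep : ∀ l' : List (List Char),
        (if i < (n:Int) then PySem.List.pySetD l' i (v i) else l').length = l'.length := by
      intro l'; split
      · rw [PySem.List.length_pySetD]
      · rfl
    rw [List.foldl_cons, ih (fun x hx => hr x (List.mem_cons_of_mem _ hx)) _ (by rw [hstep, hl])]
    by_cases hjn : j < n
    · by_cases hjr : (j:Int) ∈ r
      · simp [hjr, hjn]
      · by_cases hij : i = (j : Int)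
        · simp only [hjr, hjn, false_and, if_false, List.mem_cons, hij, true_or, true_and, if_true]
          rw [if_pos (by exact_mod_cast hjn : ((j:Int)) < (n:Int)),
            PySem.List.pySetD_of_nonneg _ _ (Int.natCast_nonneg j)]
          simp [List.getElem?_set, hl, hjn]
        · have : ((j:Int) ∈ i :: r) = False := by simp [hij, hjr]; omega
          simp only [hjr, hjn, false_and, if_false, this, false_and, if_false]
          split
          · rw [PySem.List.pySetD_of_nonneg _ _ hi]
            have : i.toNat ≠ j := by omega
            simp [List.getElem?_set, this]
          · rfl
    · have h1 : ¬ ((j:Int) ∈ r ∧ j < n) := by simp [hjn]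
      have h2 : ¬ ((j:Int) ∈ i :: r ∧ j < n) := by simp [hjn]
      rw [if_neg h1, if_neg h2]
      split
      · rw [PySem.List.pySetD_of_nonneg _ _ hi]
        have : i.toNat ≠ j := by omega
        simp [List.getElem?_set, this]
      · rfl

-- pvColorRegion reads as: the region's paint where it covers j, the old value elsewhere
lemma pvColorRegion_get? (cs : List Char) (qs : List Int) (loc : Option (Int × Int)) (color : List Char)
    (l : List (List Char)) (hl : l.length = cs.length) (j : Nat) (hj : j < cs.length) :
    (pvColorRegion cs qs loc color l)[j]? =
      if pvCovers loc j then some (color ++ pvPlain cs qs j ++ pvReset) else l[j]? := by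
  cases loc with
  | none => simp [pvColorRegion, pvCovers]
  | some ab =>
    obtain ⟨a, b⟩ := ab
    by_cases hneg : a < 0 ∨ b < 0
    · have : pvCovers (some (a, b)) j = false := by simp [pvCovers]; omega
      simp [pvColorRegion, hneg, this]
    · push Not at hneg
      simp only [pvColorRegion, if_neg (by omega : ¬ (a < 0 ∨ b < 0))]
      rw [pvFoldl_set_get? _ cs.length _
        (fun i hi => by have := (PySem.List.mem_pyRange_one).1 hi; omega) l hl j]
      simp only [PySem.List.mem_pyRange_one]
      by_cases hab : a ≤ (j:Int) ∧ (j:Int) ≤ b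
      · have hc : pvCovers (some (a, b)) (j:Int) = true := by
          simp [pvCovers]; omega
        rw [if_pos ⟨⟨hab.1, by omega⟩, hj⟩, hc, if_pos rfl]
      · have hc : pvCovers (some (a, b)) (j:Int) = false := by
          simp [pvCovers]; omega
        rw [if_neg (by omega), hc]
        simp

lemma pvColorRegion_length (cs : List Char) (qs : List Int) (loc : Option (Int × Int))
    (color : List Char) (l : List (List Char)) :
    (pvColorRegion cs qs loc color l).length = l.length := by
  cases loc with
  | none => rfl
  | some ab =>
    obtain ⟨a, b⟩ := ab
    by_cases hneg : a < 0 ∨ b < 0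
    · simp [pvColorRegion, hneg]
    · simp only [pvColorRegion, if_neg hneg]
      apply pvFoldl_length
      intro l' i; split
      · rw [PySem.List.length_pySetD]
      · rfl

-- the fill loop: each index processed once; writes the plain chunk where the cell is still empty
lemma pvFoldl_fill_get? (plain : Int → List Char) (r : List Int) (hr : ∀ i ∈ r, 0 ≤ i) (hnd : r.Nodup)
    (l : List (List Char)) (j : Nat) (hj : j < l.length) :
    (r.foldl (fun l i => if PySem.List.pyGetD l i [] = [] then PySem.List.pySetD l i (plain i) else l) l)[j]? =
      if (j : Int) ∈ r then some (if l[j]?.getD [] = [] then plain j else l[j]?.getD []) else l[j]? := by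
  induction r generalizing l with
  | nil => simp
  | cons i r ih =>
    have hi : 0 ≤ i := hr i (by simp)
    have hstep : ∀ l' : List (List Char),
        (if PySem.List.pyGetD l' i [] = [] then PySem.List.pySetD l' i (plain i) else l').length = l'.length := by
      intro l'; split
      · rw [PySem.List.length_pySetD]
      · rfl
    rw [List.foldl_cons, ih (fun x hx => hr x (List.mem_cons_of_mem _ hx)) hnd.of_cons _ (by rw [hstep]; exact hj)]
    by_cases hjr : (j:Int) ∈ r
    · have hij : i ≠ (j:Int) := fun h => (List.nodup_cons.1 hnd).1 (h ▸ hjr)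
      have hij' : i.toNat ≠ j := by omega
      have heq : (if PySem.List.pyGetD l i [] = [] then PySem.List.pySetD l i (plain i) else l)[j]? = l[j]? := by
        split
        · rw [PySem.List.pySetD_of_nonneg _ _ hi]
          simp [List.getElem?_set, hij']
        · rfl
      simp only [hjr, if_true, List.mem_cons, or_true, heq]
    · by_cases hij : i = (j:Int)
      · have hin : (j:Int) ∈ i :: r := by simp [hij]
        have hgl : l[j]? = some l[j] := List.getElem?_eq_getElem hj
        have hget : PySem.List.pyGetD l i [] = l[j] := by
          rw [hij, PySem.List.pyGetD_eq_getElem l [] (by omega) (by exact_mod_cast hj)]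
          simp
        rw [if_neg hjr, if_pos hin]
        by_cases hemp : l[j] = []
        · have hc : PySem.List.pyGetD l i [] = [] := hget.trans hemp
          rw [if_pos hc, PySem.List.pySetD_of_nonneg _ _ hi, hij]
          simp [List.getElem?_set, hj, hgl, hemp]
        · rw [if_neg (by rw [hget]; exact hemp)]
          simp [hgl, hemp]
      · have hnin : (j:Int) ∉ i :: r := by simp [hjr]; omega
        rw [if_neg hjr, if_neg hnin]
        split
        · rw [PySem.List.pySetD_of_nonneg _ _ hi]
          have : i.toNat ≠ j := by omega
          simp [List.getElem?_set, this]
        · rfl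

-- ===== VERDICT (by name: the statement is the Claim_ definition above) =====
theorem color_sequence_spec : Claim_equal_color_sequence := by
  intro seq qs p1 p2 b1 b2 _hdom _hpre
  unfold Spec_color_sequence
  show color_sequence seq qs p1 p2 b1 b2 = color_sequence_alt seq qs p1 p2 b1 b2
  simp only [color_sequence, color_sequence_alt]
  set cs := seq.toList with hcs
  set n := cs.length with hn
  have l0 : (List.replicate n ([] : List Char)).length = n := List.length_replicate
  set c1 := pvColorRegion cs qs b1 pvBlue (List.replicate n []) with hc1
  set c2 := pvColorRegion cs qs p1 pvGreen c1 with hc2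
  set c3 := pvColorRegion cs qs p2 pvGreen c2 with hc3
  set c4 := pvColorRegion cs qs b2 pvBlue c3 with hc4
  have l1 : c1.length = n := by rw [hc1, pvColorRegion_length]; exact l0
  have l2 : c2.length = n := by rw [hc2, pvColorRegion_length]; exact l1
  have l3 : c3.length = n := by rw [hc3, pvColorRegion_length]; exact l2
  have l4 : c4.length = n := by rw [hc4, pvColorRegion_length]; exact l3
  set F := (PySem.List.pyRange 0 (n:Int) 1).foldl
      (fun l i => if PySem.List.pyGetD l i [] = [] then PySem.List.pySetD l i (pvPlain cs qs i) else l) c4 with hF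
  have lF : F.length = n := by
    rw [hF, pvFoldl_length]
    · exact l4
    · intro l i; split
      · rw [PySem.List.length_pySetD]
      · rfl
  have hslice : PySem.List.slice F (some 0) (some ((n:Int))) = F := by
    rw [PySem.List.slice_zero_start, PySem.List.slice_to_natCast, ← lF, List.take_length]
  rw [hslice]
  have hmain : F = (PySem.List.enumerate cs 0).map
      (fun p => pvChunk qs [(b2, pvBlue), (p2, pvGreen), (p1, pvGreen), (b1, pvBlue)] p.1 p.2) := by
    apply List.ext_getElem?
    intro j
    by_cases hj : j < n
    · have hjcs : j < cs.length := by rw [← hn]; exact hj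
      have hmem : ((j:Int)) ∈ PySem.List.pyRange 0 (n:Int) 1 := by
        rw [PySem.List.mem_pyRange_one]; omega
      have hrange : ∀ i ∈ PySem.List.pyRange 0 (n:Int) 1, 0 ≤ i :=
        fun i hi => ((PySem.List.mem_pyRange_one).1 hi).1
      have hnd : (PySem.List.pyRange 0 (n:Int) 1).Nodup := by
        rw [PySem.List.pyRange_zero_natCast]
        exact List.nodup_range.map (fun a b h => by exact_mod_cast h)
      have g1 : c1[j]? = if pvCovers b1 (j:Int) then some (pvBlue ++ pvPlain cs qs (j:Int) ++ pvReset) else some [] := by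
        rw [hc1, pvColorRegion_get? _ _ _ _ _ (by rw [← hn]; exact l0) j hjcs]
        simp [hj]
      have g2 : c2[j]? = if pvCovers p1 (j:Int) then some (pvGreen ++ pvPlain cs qs (j:Int) ++ pvReset) else c1[j]? := by
        rw [hc2, pvColorRegion_get? _ _ _ _ _ (by rw [← hn]; exact l1) j hjcs]
      have g3 : c3[j]? = if pvCovers p2 (j:Int) then some (pvGreen ++ pvPlain cs qs (j:Int) ++ pvReset) else c2[j]? := by
        rw [hc3, pvColorRegion_get? _ _ _ _ _ (by rw [← hn]; exact l2) j hjcs]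
      have g4 : c4[j]? = if pvCovers b2 (j:Int) then some (pvBlue ++ pvPlain cs qs (j:Int) ++ pvReset) else c3[j]? := by
        rw [hc4, pvColorRegion_get? _ _ _ _ _ (by rw [← hn]; exact l3) j hjcs]
      have hplain : pvPlain cs qs (j:Int) =
          (if PySem.List.pyGetD qs (j:Int) 0 < 10 then [PySem.Chars.lowerChar cs[j]] else [cs[j]]) := by
        rw [pvPlain, PySem.List.pyGetD_eq_getElem cs ' ' (by omega) (by exact_mod_cast hjcs)]
        simp
      rw [hF, pvFoldl_fill_get? _ _ hrange hnd c4 j (by rw [l4]; exact hj), if_pos hmem,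
        List.getElem?_map, PySem.List.getElem?_enumerate, List.getElem?_eq_getElem hjcs]
      simp only [Option.map_some]
      rw [g4, g3, g2, g1]
      simp only [pvChunk, List.find?, zero_add, hplain]
      by_cases hb2c : pvCovers b2 (j:Int) <;>
        by_cases hp2c : pvCovers p2 (j:Int) <;>
          by_cases hp1c : pvCovers p1 (j:Int) <;>
            by_cases hb1c : pvCovers b1 (j:Int) <;>
              simp [hb2c, hp2c, hp1c, hb1c, pvBlue, pvGreen, pvReset]
    · rw [List.getElem?_eq_none (by rw [lF]; omega),
        List.getElem?_eq_none (by rw [List.length_map, PySem.List.length_enumerate, ← hn]; omega)]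
  rw [hmain]
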